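-- pv_equiv track=rewrite | github.com/Mergifyio/mergify | mergify_engine/tests/functional/conftest.py | pyvcr_response_filter
-- ===== SOURCE A (Python) =====
-- def pyvcr_response_filter(response):
--     for h in [
--         "CF-Cache-Status",
--         "CF-RAY",
--         "Expect-CT",
--         "Report-To",
--         "NEL",
--         "cf-request-id",
--         "Via",
--         "X-GitHub-Request-Id",
--         "Date",
--         "ETag",
--         "X-RateLimit-Reset",
--         "X-RateLimit-Used",
--         "X-RateLimit-Resource",
--         "X-RateLimit-Limit",
--         "Via",
--         "cookie",
--         "Expires",
--         "Fastly-Request-ID",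
--         "X-Timer",
--         "X-Served-By",
--         "Last-Modified",
--         "X-RateLimit-Remaining",
--         "X-Runtime-rack",
--         "Access-Control-Allow-Origin",
--         "Access-Control-Expose-Headers",
--         "Cache-Control",
--         "Content-Security-Policy",
--         "Referrer-Policy",
--         "Server",
--         "Status",
--         "Strict-Transport-Security",
--         "Vary",
--         "X-Content-Type-Options",
--         "X-Frame-Options",
--         "X-XSS-Protection",
--     ]:
--         response["headers"].pop(h, None)
--     return response
-- ===== SOURCE B (Python) =====
-- HEADER_SET = frozenset([
--     "CF-Cache-Status", "CF-RAY", "Expect-CT", "Report-To", "NEL",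
--     "cf-request-id", "Via", "X-GitHub-Request-Id", "Date", "ETag",
--     "X-RateLimit-Reset", "X-RateLimit-Used", "X-RateLimit-Resource",
--     "X-RateLimit-Limit", "cookie", "Expires", "Fastly-Request-ID",
--     "X-Timer", "X-Served-By", "Last-Modified", "X-RateLimit-Remaining",
--     "X-Runtime-rack", "Access-Control-Allow-Origin",
--     "Access-Control-Expose-Headers", "Cache-Control",
--     "Content-Security-Policy", "Referrer-Policy", "Server", "Status",
--     "Strict-Transport-Security", "Vary", "X-Content-Type-Options",
--     "X-Frame-Options", "X-XSS-Protection",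
-- ])
--
--
-- def pyvcr_response_filter(response):
--     headers = response["headers"]
--     kept = {k: v for k, v in headers.items() if k not in HEADER_SET}
--     headers.clear()
--     headers.update(kept)
--     return response
-- ===== Notes on version B (the rewrite author's own statement) =====
-- stated objective: idiomatic
-- what changed: Instead of 35 repeated pop calls (one scan per constant name), B builds in one comprehension pass the surviving headers (keys not in a module-level frozenset) and rewrites the headers dict in place with them.
-- outside the precondition, e.g. on pyvcr_response_filter({}): A raises KeyError, B raises KeyError
import Mathlib
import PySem

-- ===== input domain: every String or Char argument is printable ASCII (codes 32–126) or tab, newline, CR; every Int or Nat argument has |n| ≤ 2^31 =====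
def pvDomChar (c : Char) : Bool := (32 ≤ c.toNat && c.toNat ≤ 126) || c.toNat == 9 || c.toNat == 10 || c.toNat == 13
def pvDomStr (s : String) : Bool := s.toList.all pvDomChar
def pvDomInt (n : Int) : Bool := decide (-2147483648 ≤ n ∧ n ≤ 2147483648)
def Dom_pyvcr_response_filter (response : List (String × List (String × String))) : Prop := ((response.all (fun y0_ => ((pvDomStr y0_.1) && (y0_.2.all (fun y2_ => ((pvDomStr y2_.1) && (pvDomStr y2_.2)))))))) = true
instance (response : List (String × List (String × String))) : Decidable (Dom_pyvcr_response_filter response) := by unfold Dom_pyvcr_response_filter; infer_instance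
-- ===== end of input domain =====

-- B builds the surviving headers in one filter pass over the headers present (keys not in a
-- frozenset of the names) and rewrites the headers dict with them, instead of popping each of
-- the 35 constant names; both mutate response["headers"] in place (the equivalence here is
-- about the returned value, which aliases the mutated argument).

-- ===== PORT A =====
def pyHeaderNames : List String :=
  ["CF-Cache-Status", "CF-RAY", "Expect-CT", "Report-To", "NEL",
   "cf-request-id", "Via", "X-GitHub-Request-Id", "Date", "ETag",
   "X-RateLimit-Reset", "X-RateLimit-Used", "X-RateLimit-Resource",
   "X-RateLimit-Limit", "Via", "cookie", "Expires", "Fastly-Request-ID",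
   "X-Timer", "X-Served-By", "Last-Modified", "X-RateLimit-Remaining",
   "X-Runtime-rack", "Access-Control-Allow-Origin",
   "Access-Control-Expose-Headers", "Cache-Control",
   "Content-Security-Policy", "Referrer-Policy", "Server", "Status",
   "Strict-Transport-Security", "Vary", "X-Content-Type-Options",
   "X-Frame-Options", "X-XSS-Protection"]

-- response["headers"].pop(h, None): remove key h from the dict at "headers", in place
-- (with unique keys, removing the first match is exact)
def pvDelHdr (r : List (String × List (String × String))) (h : String) : List (String × List (String × String)) :=
  r.map (fun p => if p.1 = "headers" then (p.1, p.2.eraseP (fun kv => kv.1 == h)) else p)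

def pyvcr_response_filter (response : List (String × List (String × String))) : List (String × List (String × String)) :=
  pyHeaderNames.foldl pvDelHdr response

-- ===== PORT B =====
def pvHeaderSet : PySem.Set String := PySem.Set.ofList pyHeaderNames

-- headers.clear(); headers.update(kept): the dict object at key "headers" now holds kept
def pyvcr_response_filter_alt (response : List (String × List (String × String))) : List (String × List (String × String)) :=
  let headers := (PySem.Dict.mk response).getD "headers" []
  let kept := headers.filter (fun kv => !(PySem.Set.contains pvHeaderSet kv.1))
  response.map (fun p => if p.1 = "headers" then (p.1, kept) else p)

-- ===== PRECONDITION & SPEC =====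
-- Pre_ excludes inputs where Python A raises KeyError ("headers" missing) and association
-- lists with duplicate keys (outer or inner), which cannot occur as Python dicts at all.
def Pre_pyvcr_response_filter (response : List (String × List (String × String))) : Prop :=
  "headers" ∈ response.map Prod.fst ∧ (response.map Prod.fst).Nodup ∧
    ∀ p ∈ response, (p.2.map Prod.fst).Nodup

instance (response : List (String × List (String × String))) : Decidable (Pre_pyvcr_response_filter response) := by
  unfold Pre_pyvcr_response_filter; infer_instance

def pvWitness_pyvcr_response_filter : (List (String × List (String × String))) :=
  [("headers", [("Date", "x"), ("Foo", "y")])]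

def Spec_pyvcr_response_filter (response : List (String × List (String × String))) (out : List (String × List (String × String))) : Prop := out = pyvcr_response_filter_alt response
instance (response : List (String × List (String × String))) (out : List (String × List (String × String))) : Decidable (Spec_pyvcr_response_filter response out) := by unfold Spec_pyvcr_response_filter; infer_instance

-- ===== CLAIM (what is proved, stated in full; the proofs are below) =====
def Claim_equal_pyvcr_response_filter : Prop := ∀ (response : List (String × List (String × String))), Dom_pyvcr_response_filter response → Pre_pyvcr_response_filter response → Spec_pyvcr_response_filter response (pyvcr_response_filter response)

-- ===== LEMMAS AND PROOFS =====

def pvEraseAll (hs : List (String × String)) (L : List String) : List (String × String) :=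
  L.foldl (fun hs h => hs.eraseP (fun kv => kv.1 == h)) hs

-- a fold of per-key in-place deletions is one in-place update by the inner fold
theorem foldl_pvDelHdr (L : List String) (r : List (String × List (String × String))) :
    L.foldl pvDelHdr r
      = r.map (fun p => if p.1 = "headers" then (p.1, pvEraseAll p.2 L) else p) := by
  induction L generalizing r with
  | nil => simp [pvEraseAll, List.map_id'']
  | cons h t ih =>
      show t.foldl pvDelHdr (pvDelHdr r h) = _
      rw [ih, pvDelHdr, List.map_map]
      refine List.map_congr_left (fun p _ => ?_)
      by_cases hp : p.1 = "headers" <;> simp [hp, pvEraseAll]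

theorem eraseP_eq_filter_of_nodup (hs : List (String × String)) (h : String)
    (hn : (hs.map Prod.fst).Nodup) :
    hs.eraseP (fun kv => kv.1 == h) = hs.filter (fun kv => ¬ kv.1 == h) := by
  induction hs with
  | nil => rfl
  | cons kv t ih =>
      simp only [List.map_cons, List.nodup_cons] at hn
      by_cases hk : kv.1 = h
      · have hfil : t.filter (fun kv => !decide (kv.1 = h)) = t := by
          refine List.filter_eq_self.mpr (fun q hq => ?_)
          have : q.1 ≠ h := fun e => hn.1 (by rw [hk, ← e]; exact List.mem_map_of_mem hq)
          simp [this]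
        simp [hk, hfil]
      · simp [hk, ih hn.2]

theorem nodup_keys_filter (hs : List (String × String)) (q : (String × String) → Bool)
    (hn : (hs.map Prod.fst).Nodup) : ((hs.filter q).map Prod.fst).Nodup :=
  hn.sublist (List.Sublist.map Prod.fst List.filter_sublist)

theorem pvEraseAll_eq_filter (L : List String) (hs : List (String × String))
    (hn : (hs.map Prod.fst).Nodup) :
    pvEraseAll hs L = hs.filter (fun kv => decide (kv.1 ∉ L)) := by
  induction L generalizing hs with
  | nil => simp [pvEraseAll]
  | cons h t ih =>
      show pvEraseAll (hs.eraseP (fun kv => kv.1 == h)) t = _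
      rw [eraseP_eq_filter_of_nodup hs h hn,
        ih _ (nodup_keys_filter hs _ hn), List.filter_filter]
      refine List.filter_congr (fun kv _ => ?_)
      by_cases h1 : kv.1 = h <;> simp [h1]

-- ===== VERDICT (by name: the statement is the Claim_ definition above) =====
theorem pyvcr_response_filter_spec : Claim_equal_pyvcr_response_filter := by
  intro response _ hpre
  obtain ⟨-, hnodup, hinner⟩ := hpre
  show pyvcr_response_filter response = pyvcr_response_filter_alt response
  unfold pyvcr_response_filter pyvcr_response_filter_alt
  rw [foldl_pvDelHdr]
  refine List.map_congr_left (fun p hp => ?_)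
  by_cases hk : p.1 = "headers"
  · have hkeys : (PySem.Dict.mk response).keys.Nodup := hnodup
    have hmem : ("headers", p.2) ∈ (PySem.Dict.mk response).items := by
      show ("headers", p.2) ∈ response
      rw [← hk]; exact hp
    have hgetD : (PySem.Dict.mk response).getD "headers" [] = p.2 :=
      PySem.Dict.getD_of_mem_items _ hmem hkeys []
    have hn2 : (p.2.map Prod.fst).Nodup := hinner p hp
    rw [if_pos hk, if_pos hk, hgetD, pvEraseAll_eq_filter _ _ hn2]
    refine congrArg _ (List.filter_congr (fun kv hkv => ?_))
    simp [pvHeaderSet, PySem.Set.mem_ofList]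
  · simp [hk]
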